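-- pv_equiv track=rewrite | github.com/wangsun39/leetcode | allcode/1900-1999/1931colorTheGrid.py | dfs
-- ===== SOURCE A (Python) =====
-- def dfs(i, j, mx):
--     res = []
--     if i == mx:
--         for k in range(3):
--             if k != j:
--                 res.append([k])
--     else:
--         for k in range(3):
--             if k != j:
--                 l = dfs(i + 1, k, mx)
--                 for t in range(len(l)):
--                     l[t] = [k] + l[t]
--                 res += l
--     return res
-- ===== SOURCE B (Python) =====
-- def dfs(i, j, mx):
--     # Bottom-up: build all valid colorings of length mx-i+1 once, then filter by start color.
--     seqs = [[k] for k in range(3)]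
--     for _ in range(mx - i):
--         seqs = [[k] + s for k in range(3) for s in seqs if k != s[0]]
--     return [s for s in seqs if s[0] != j]
-- ===== Notes on version B (the rewrite author's own statement) =====
-- stated objective: alternative
-- what changed: Replaces A's top-down recursion (which re-enumerates and re-prepends through every recursive level, copying each sequence once per remaining level) with a single bottom-up loop that builds the set of valid colorings once per length and filters by the start color at the end.
import Mathlib
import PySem

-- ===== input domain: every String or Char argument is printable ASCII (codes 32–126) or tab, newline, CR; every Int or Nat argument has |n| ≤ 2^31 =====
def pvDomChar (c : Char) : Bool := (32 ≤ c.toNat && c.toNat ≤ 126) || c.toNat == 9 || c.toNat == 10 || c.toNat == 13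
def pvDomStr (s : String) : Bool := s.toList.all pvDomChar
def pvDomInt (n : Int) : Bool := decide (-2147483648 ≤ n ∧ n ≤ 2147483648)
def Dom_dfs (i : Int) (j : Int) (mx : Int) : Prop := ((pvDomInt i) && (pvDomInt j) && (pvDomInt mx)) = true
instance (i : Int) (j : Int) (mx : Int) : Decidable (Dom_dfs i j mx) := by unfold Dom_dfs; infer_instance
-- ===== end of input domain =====

-- B builds the sequences bottom-up in one iterative pass instead of A's top-down
-- recursion that re-prepends through every recursive level (objective: alternative algorithm).

-- ===== PORT A =====
-- A recurses with i+1 until i == mx; fuel (mx - i).toNat counts exactly those steps.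
-- When i > mx the Python recursion never terminates (RecursionError): excluded by Pre_dfs.
def dfsFuel : Nat → Int → Int → Int → List (List Int)
  | fuel, i, j, mx =>
    if i = mx then
      (PySem.List.pyRange 0 3 1).foldl (fun res k => if k ≠ j then res ++ [[k]] else res) []
    else
      match fuel with
      | 0 => []   -- unreachable under Pre_dfs (Python would recurse forever here)
      | f + 1 =>
        (PySem.List.pyRange 0 3 1).foldl
          (fun res k =>
            if k ≠ j then
              -- l = dfs(i+1, k, mx); l[t] = [k] + l[t] for each t; res += l
              res ++ (dfsFuel f (i + 1) k mx).map (fun t => [k] ++ t)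
            else res) []

def dfs (i : Int) (j : Int) (mx : Int) : List (List Int) :=
  dfsFuel (mx - i).toNat i j mx

-- ===== PORT B =====
-- s[0] is ported as s.head? (exact: every element of seqs is nonempty by construction).
def dfs_alt (i : Int) (j : Int) (mx : Int) : List (List Int) :=
  let init := (PySem.List.pyRange 0 3 1).map (fun k => [k])
  let seqs := (PySem.List.pyRange 0 (mx - i) 1).foldl
    (fun seqs _ =>
      (PySem.List.pyRange 0 3 1).flatMap
        (fun k => seqs.filterMap (fun s => if s.head? ≠ some k then some ([k] ++ s) else none)))
    init
  seqs.filter (fun s => s.head? ≠ some j)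

-- ===== PRECONDITION & SPEC =====
-- Pre_dfs excludes i > mx, where the Python A recurses forever (RecursionError).
def Pre_dfs (i : Int) (j : Int) (mx : Int) : Prop := i ≤ mx
instance (i : Int) (j : Int) (mx : Int) : Decidable (Pre_dfs i j mx) := by unfold Pre_dfs; infer_instance
def pvWitness_dfs : Int × Int × Int := (0, 0, 2)

def Spec_dfs (i : Int) (j : Int) (mx : Int) (out : List (List Int)) : Prop := out = dfs_alt i j mx
instance (i : Int) (j : Int) (mx : Int) (out : List (List Int)) : Decidable (Spec_dfs i j mx out) := by unfold Spec_dfs; infer_instance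

-- ===== CLAIM (what is proved, stated in full; the proofs are below) =====
def Claim_equal_dfs : Prop := ∀ (i : Int) (j : Int) (mx : Int), Dom_dfs i j mx → Pre_dfs i j mx → Spec_dfs i j mx (dfs i j mx)

-- ===== LEMMAS AND PROOFS =====

-- A's recursion depends on (i, mx) only through the remaining depth; dfsA is that pure form.
def dfsA : Nat → Int → List (List Int)
  | 0, j => [0, 1, 2].foldl (fun res k => if k ≠ j then res ++ [[k]] else res) []
  | n + 1, j => [0, 1, 2].foldl
      (fun res k => if k ≠ j then res ++ (dfsA n k).map (fun t => k :: t) else res) []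

-- B's one loop iteration (exactly the foldl body of dfs_alt).
def stepB (L : List (List Int)) : List (List Int) :=
  (PySem.List.pyRange 0 3 1).flatMap
    (fun k => L.filterMap (fun s => if s.head? ≠ some k then some ([k] ++ s) else none))

lemma range3 : PySem.List.pyRange 0 3 1 = [0, 1, 2] := by decide

lemma dfsFuel_eq_dfsA : ∀ (f : Nat) (i j mx : Int), i ≤ mx → (mx - i).toNat = f →
    dfsFuel f i j mx = dfsA f j := by
  intro f
  induction f with
  | zero =>
    intro i j mx hle hf
    have : i = mx := by omega
    subst this
    simp [dfsFuel, dfsA, range3, List.foldl]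
  | succ f ih =>
    intro i j mx hle hf
    have hne : i ≠ mx := by omega
    have h1 : i + 1 ≤ mx := by omega
    have h2 : (mx - (i + 1)).toNat = f := by omega
    rw [dfsFuel, if_neg hne]
    simp only [range3, List.foldl, dfsA, ih (i + 1) _ mx h1 h2, List.cons_append,
      List.nil_append]

lemma filterMap_prepend (L : List (List Int)) (k : Int) :
    L.filterMap (fun s => if s.head? ≠ some k then some (k :: s) else none)
      = (L.filter (fun s => decide (s.head? ≠ some k))).map (fun s => k :: s) := by
  induction L with
  | nil => rfl
  | cons s L ih =>
    rw [List.filterMap_cons, List.filter_cons, ih]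
    by_cases h : s.head? = some k
    · simp [h]
    · simp [h]

lemma filter_head_map (L : List (List Int)) (k j : Int) :
    ((L.filter (fun s => decide (s.head? ≠ some k))).map (fun s => k :: s)).filter
        (fun s => decide (s.head? ≠ some j))
      = if k ≠ j then (L.filter (fun s => decide (s.head? ≠ some k))).map (fun s => k :: s)
        else [] := by
  by_cases h : k = j
  · subst h; simp [List.filter_map, Function.comp_def]
  · rw [if_pos h]
    rw [List.filter_eq_self.2]
    intro s hs
    rcases List.mem_map.1 hs with ⟨t, _, rfl⟩
    simpa using h

lemma dfsA_eq_stepB : ∀ (n : Nat) (j : Int),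
    dfsA n j = (stepB^[n] ((PySem.List.pyRange 0 3 1).map (fun k => ([k] : List Int)))).filter
      (fun s => decide (s.head? ≠ some j)) := by
  intro n
  induction n with
  | zero =>
    intro j
    simp only [Function.iterate_zero, id_eq, range3, List.map_cons, List.map_nil, dfsA,
      List.foldl_cons, List.foldl_nil, List.filter_cons, List.filter_nil]
    by_cases h0 : (0 : Int) = j <;> by_cases h1 : (1 : Int) = j <;> by_cases h2 : (2 : Int) = j <;>
      simp [h0, h1, h2]
  | succ n ih =>
    intro j
    rw [Function.iterate_succ_apply']
    set L := stepB^[n] ((PySem.List.pyRange 0 3 1).map (fun k => ([k] : List Int))) with hL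
    have hstep : stepB L
        = (L.filter (fun s => decide (s.head? ≠ some (0 : Int)))).map (fun s => (0 : Int) :: s)
          ++ ((L.filter (fun s => decide (s.head? ≠ some (1 : Int)))).map (fun s => (1 : Int) :: s)
          ++ (L.filter (fun s => decide (s.head? ≠ some (2 : Int)))).map (fun s => (2 : Int) :: s)) := by
      simp only [stepB, range3, List.flatMap_cons, List.flatMap_nil, List.append_nil,
        List.cons_append, List.nil_append, filterMap_prepend]
    rw [hstep, List.filter_append, List.filter_append, filter_head_map, filter_head_map,
      filter_head_map]
    simp only [dfsA, List.foldl_cons, List.foldl_nil, ih, List.nil_append]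
    by_cases h0 : (0 : Int) = j <;> by_cases h1 : (1 : Int) = j <;> by_cases h2 : (2 : Int) = j <;>
      simp [h0, h1, h2]

lemma foldl_stepB (l : List Int) (a : List (List Int)) :
    l.foldl (fun (seqs : List (List Int)) (_ : Int) =>
        (PySem.List.pyRange 0 3 1).flatMap
          (fun k => seqs.filterMap (fun s => if s.head? ≠ some k then some ([k] ++ s) else none))) a
      = stepB^[l.length] a := by
  induction l generalizing a with
  | nil => rfl
  | cons x l ih =>
    rw [List.foldl_cons, List.length_cons, ih, Function.iterate_succ_apply]
    rfl

lemma dfs_alt_eq (i j mx : Int) :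
    dfs_alt i j mx
      = (stepB^[(mx - i).toNat] ((PySem.List.pyRange 0 3 1).map (fun k => ([k] : List Int)))).filter
        (fun s => decide (s.head? ≠ some j)) := by
  unfold dfs_alt
  simp only [foldl_stepB, PySem.List.length_pyRange_one, Int.sub_zero]

-- ===== VERDICT (by name: the statement is the Claim_ definition above) =====
theorem dfs_spec : Claim_equal_dfs := by
  intro i j mx _ hpre
  unfold Spec_dfs dfs
  rw [dfsFuel_eq_dfsA (mx - i).toNat i j mx hpre rfl, dfs_alt_eq, dfsA_eq_stepB]
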